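-- pv_equiv track=rewrite | github.com/dubaigit/task-mail | email_complete_solution.py | parse_email_block
-- ===== SOURCE A (Python) =====
-- from typing import Dict, List, Optional
--
-- def parse_email_block(block: str) -> Optional[Dict]:
--     """Parse email block into dictionary."""
--
--     email = {}
--     lines = block.split("\n")
--     content_started = False
--     content_lines = []
--
--     for line in lines:
--         if "|||END|||" in line:
--             break
--         elif "CONTENT_START:" in line:
--             content_started = True
--         elif content_started:
--             content_lines.append(line)
--         elif ":" in line and not content_started:
--             key, value = line.split(":", 1)
--             email[key.strip()] = value.strip()
--
--     if content_lines:
--         email['CONTENT'] = "\n".join(content_lines)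
--
--     return email if email else None
-- ===== SOURCE B (Python) =====
-- def parse_email_block(block: str):
--     """Parse email block into dictionary."""
--     lines = block.split("\n")
--     for i, line in enumerate(lines):
--         if "|||END|||" in line:
--             lines = lines[:i]
--             break
--     start = next((i for i, l in enumerate(lines) if "CONTENT_START:" in l), len(lines))
--     email = {}
--     for line in lines[:start]:
--         if ":" in line:
--             key, value = line.split(":", 1)
--             email[key.strip()] = value.strip()
--     content = [l for l in lines[start + 1:] if "CONTENT_START:" not in l]
--     if content:
--         email["CONTENT"] = "\n".join(content)
--     return email or None
-- ===== Notes on version B (the rewrite author's own statement) =====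
-- stated objective: simpler
-- what changed: Replaced A's single flag-driven loop with break by a slice decomposition: truncate at the first |||END||| line, cut at the first CONTENT_START line, parse the header slice, filter the content slice.
import Mathlib
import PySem

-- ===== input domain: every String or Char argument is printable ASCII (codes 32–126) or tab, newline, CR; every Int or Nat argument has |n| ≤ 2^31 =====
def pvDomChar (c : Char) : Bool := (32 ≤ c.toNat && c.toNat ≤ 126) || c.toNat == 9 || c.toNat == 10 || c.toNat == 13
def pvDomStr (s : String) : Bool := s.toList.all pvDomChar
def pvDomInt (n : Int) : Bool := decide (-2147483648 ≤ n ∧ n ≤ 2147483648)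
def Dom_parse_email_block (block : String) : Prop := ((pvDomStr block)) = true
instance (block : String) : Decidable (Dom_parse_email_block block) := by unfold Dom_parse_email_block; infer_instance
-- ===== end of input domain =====

-- B re-decomposes A's single flag-driven loop into slicing: truncate at END, cut at the first
-- CONTENT_START, parse the header slice, filter the content slice (objective: simpler; no speed claim).

-- ===== PORT A =====
-- one header step: if ":" in line, split(":",1) and insert stripped key/value
def pvHeaderStep (email : PySem.Dict String String) (line : String) : PySem.Dict String String :=
  if PySem.Str.isIn ":" line then
    match PySem.Str.splitMax? line ":" 1 with
    | some (key :: value :: _) => email.insert (PySem.Str.strip key) (PySem.Str.strip value)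
    | _ => email   -- unreachable: sep ":" is nonempty and occurs in line
  else email

-- A's for-loop with break, carrying (email, content_started, content_lines)
def pvLoopA (lines : List String) (email : PySem.Dict String String)
    (started : Bool) (content : List String) : PySem.Dict String String × List String :=
  match lines with
  | [] => (email, content)
  | line :: rest =>
    if PySem.Str.isIn "|||END|||" line then (email, content)
    else if PySem.Str.isIn "CONTENT_START:" line then pvLoopA rest email true content
    else if started then pvLoopA rest email started (content ++ [line])
    else pvLoopA rest (pvHeaderStep email line) started content

def parse_email_block (block : String) : Option (List (String × String)) :=
  let lines := (PySem.Str.split? block "\n").getD []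
  let (email, content_lines) := pvLoopA lines PySem.Dict.empty false []
  let email := if content_lines.isEmpty then email
               else email.insert "CONTENT" (PySem.Str.join "\n" content_lines)
  if email.items.isEmpty then none else some email.items

-- ===== PORT B =====
-- B first truncates at the first END line (the for/break in Source B)
def pvTrunc (lines : List String) : List String :=
  match lines.findIdx? (fun l => PySem.Str.isIn "|||END|||" l) with
  | some i => lines.take i
  | none => lines

def parse_email_block_alt (block : String) : Option (List (String × String)) :=
  let lines := pvTrunc ((PySem.Str.split? block "\n").getD [])
  let start := (lines.findIdx? (fun l => PySem.Str.isIn "CONTENT_START:" l)).getD lines.length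
  let email := (lines.take start).foldl pvHeaderStep PySem.Dict.empty
  let content := (lines.drop (start + 1)).filter (fun l => !(PySem.Str.isIn "CONTENT_START:" l))
  let email := if content.isEmpty then email
               else email.insert "CONTENT" (PySem.Str.join "\n" content)
  if email.items.isEmpty then none else some email.items

-- ===== PRECONDITION & SPEC =====
def Spec_parse_email_block (block : String) (out : Option (List (String × String))) : Prop := out = parse_email_block_alt block
instance (block : String) (out : Option (List (String × String))) : Decidable (Spec_parse_email_block block out) := by unfold Spec_parse_email_block; infer_instance

-- ===== CLAIM (what is proved, stated in full; the proofs are below) =====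
def Claim_equal_parse_email_block : Prop := ∀ (block : String), Dom_parse_email_block block → Spec_parse_email_block block (parse_email_block block)

-- ===== LEMMAS AND PROOFS =====

theorem pvTrunc_nil : pvTrunc [] = [] := rfl

theorem pvTrunc_cons (l : String) (rest : List String) :
    pvTrunc (l :: rest) =
      if PySem.Str.isIn "|||END|||" l then [] else l :: pvTrunc rest := by
  unfold pvTrunc
  rw [List.findIdx?_cons]
  by_cases h : PySem.Str.isIn "|||END|||" l
  · simp only [h, if_true, List.take_zero]
  · rw [Bool.not_eq_true] at h
    simp only [h, Bool.false_eq_true, if_false]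
    cases hf : List.findIdx? (fun l => PySem.Str.isIn "|||END|||" l) rest
    · rfl
    · simp only [Option.map_some, List.take_succ_cons]

-- A's loop with the flag already set only collects non-CONTENT_START lines up to END
theorem pvLoopA_started (lines : List String) (email : PySem.Dict String String)
    (content : List String) :
    pvLoopA lines email true content =
      (email, content ++ (pvTrunc lines).filter (fun l => !(PySem.Str.isIn "CONTENT_START:" l))) := by
  induction lines generalizing content with
  | nil => simp only [pvLoopA, pvTrunc_nil, List.filter_nil, List.append_nil]
  | cons l rest ih =>
    rw [pvTrunc_cons]
    unfold pvLoopA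
    by_cases hE : PySem.Str.isIn "|||END|||" l
    · simp only [hE, if_true, List.filter_nil, List.append_nil]
    · rw [Bool.not_eq_true] at hE
      simp only [hE, Bool.false_eq_true, if_false, List.filter_cons]
      by_cases hC : PySem.Str.isIn "CONTENT_START:" l
      · simp only [hC, if_true, ih, Bool.not_true, Bool.false_eq_true, if_false]
      · rw [Bool.not_eq_true] at hC
        simp only [hC, Bool.false_eq_true, if_false, if_true, Bool.not_false, ih,
          List.append_assoc, List.singleton_append]

-- A's loop from the initial state equals B's slice/fold/filter decomposition
theorem pvLoopA_unstarted (lines : List String) (email : PySem.Dict String String) :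
    pvLoopA lines email false [] =
      (let t := pvTrunc lines
       let start := (t.findIdx? (fun l => PySem.Str.isIn "CONTENT_START:" l)).getD t.length
       ((t.take start).foldl pvHeaderStep email,
        (t.drop (start + 1)).filter (fun l => !(PySem.Str.isIn "CONTENT_START:" l)))) := by
  induction lines generalizing email with
  | nil => simp [pvLoopA, pvTrunc_nil]
  | cons l rest ih =>
    rw [pvTrunc_cons]
    unfold pvLoopA
    by_cases hE : PySem.Str.isIn "|||END|||" l
    · simp only [hE, if_true, List.findIdx?_nil, Option.getD_none, List.length_nil,
        List.take_nil, List.foldl_nil, List.drop_nil, List.filter_nil]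
    · rw [Bool.not_eq_true] at hE
      simp only [hE, Bool.false_eq_true, if_false]
      by_cases hC : PySem.Str.isIn "CONTENT_START:" l
      · rw [pvLoopA_started]
        simp only [List.findIdx?_cons, hC, if_true, Option.getD_some, List.take_zero,
          List.foldl_nil, List.drop_succ_cons, List.drop_zero, List.nil_append]
      · rw [Bool.not_eq_true] at hC
        rw [ih]
        simp only [List.findIdx?_cons, hC, Bool.false_eq_true, if_false]
        cases hf : List.findIdx? (fun l => PySem.Str.isIn "CONTENT_START:" l) (pvTrunc rest)
        · simp only [Option.map_none, Option.getD_none, List.length_cons,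
            List.take_succ_cons, List.foldl_cons, List.drop_succ_cons]
        · simp only [Option.map_some, Option.getD_some, List.take_succ_cons,
            List.foldl_cons, List.drop_succ_cons]

-- ===== VERDICT (by name: the statement is the Claim_ definition above) =====
theorem parse_email_block_spec : Claim_equal_parse_email_block := by
  intro block _
  unfold Spec_parse_email_block parse_email_block parse_email_block_alt
  simp only [pvLoopA_unstarted, pvTrunc]
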